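-- pv_equiv track=rewrite | github.com/onuse/em-brain | server/analyze_dependencies.py | find_required_files
-- ===== SOURCE A (Python) =====
-- from typing import Dict, Set, List
--
-- def find_required_files(graph: Dict[str, Set[str]], start_files: Set[str]) -> Set[str]:
--     """Find all files required by the starting set (transitive closure)."""
--     required = set(start_files)
--     to_check = list(start_files)
--
--     while to_check:
--         current = to_check.pop()
--
--         # Find what this file imports
--         for file_name, imports in graph.items():
--             if current in imports and file_name not in required:
--                 required.add(file_name)
--                 to_check.append(file_name)
--
--     return required
-- ===== SOURCE B (Python) =====
-- def find_required_files(graph, start_files):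
--     """Find all files required by the starting set (transitive closure)."""
--     # Precompute reverse adjacency once: imp -> files that import it.
--     dependents = {}
--     for file_name, imports in graph.items():
--         for imp in imports:
--             dependents.setdefault(imp, []).append(file_name)
--
--     required = set(start_files)
--     stack = list(start_files)
--     while stack:
--         current = stack.pop()
--         for file_name in dependents.get(current, ()):
--             if file_name not in required:
--                 required.add(file_name)
--                 stack.append(file_name)
--     return required
-- ===== Notes on version B (the rewrite author's own statement) =====
-- stated objective: faster
-- what changed: B builds a reverse-adjacency map (import -> importing files) in one pass over the graph and then runs the same stack traversal over dependents.get(current), instead of rescanning every graph item for each popped file.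
import Mathlib
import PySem

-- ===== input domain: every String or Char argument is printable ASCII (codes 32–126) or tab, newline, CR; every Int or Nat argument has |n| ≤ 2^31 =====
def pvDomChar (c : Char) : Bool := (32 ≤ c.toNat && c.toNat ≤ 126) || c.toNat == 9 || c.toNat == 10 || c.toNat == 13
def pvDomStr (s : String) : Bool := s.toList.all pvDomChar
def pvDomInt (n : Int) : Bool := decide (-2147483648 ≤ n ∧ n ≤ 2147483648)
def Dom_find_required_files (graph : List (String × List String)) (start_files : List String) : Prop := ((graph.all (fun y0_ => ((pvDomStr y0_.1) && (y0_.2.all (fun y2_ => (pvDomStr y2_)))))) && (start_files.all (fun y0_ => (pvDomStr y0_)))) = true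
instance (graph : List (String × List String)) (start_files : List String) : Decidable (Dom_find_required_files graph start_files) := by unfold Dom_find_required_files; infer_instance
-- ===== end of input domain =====

-- B precomputes a reverse-adjacency map once and traverses it, instead of rescanning the
-- whole graph for each popped file (asymptotically faster); both ports use a fuel bound
-- (initial stack length + number of dict items) that only makes the shared worklist loop
-- total — each pop either ends the loop or adds only keys not yet in `required`.

-- ===== PORT A =====
-- the inner `for file_name, imports in graph.items():` scan of A
def frfScanA : List (String × List String) → String → PySem.Set String → List String → PySem.Set String × List String
  | [], _, req, tc => (req, tc)
  | (f, imps) :: rest, cur, req, tc =>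
    if imps.contains cur && !(PySem.Set.contains req f) then
      frfScanA rest cur (PySem.Set.add req f) (tc ++ [f])
    else
      frfScanA rest cur req tc

-- the `while to_check:` loop of A (fuel makes it structural; see header comment)
def frfLoopA : Nat → List (String × List String) → PySem.Set String → List String → PySem.Set String
  | 0, _, req, _ => req
  | n + 1, items, req, tc =>
    match PySem.List.pop? tc (-1) with
    | none => req
    | some (cur, rest) =>
      let s := frfScanA items cur req rest
      frfLoopA n items s.1 s.2

def find_required_files (graph : List (String × List String)) (start_files : List String) : List String :=
  let items := (PySem.Dict.ofList graph).items   -- graph is a Python dict: items() view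
  frfLoopA (start_files.length + items.length) items (PySem.Set.ofList start_files) start_files

-- ===== PORT B =====
-- `dependents.setdefault(imp, []).append(file_name)` over all items: the reverse map, built once
def frfBuildRev (items : List (String × List String)) : PySem.Dict String (List String) :=
  items.foldl (fun d p => p.2.foldl (fun d imp => d.modify imp [] (· ++ [p.1])) d) PySem.Dict.empty

-- body of B's `for file_name in dependents.get(current, ()):`
def frfPush (s : PySem.Set String × List String) (f : String) : PySem.Set String × List String :=
  if PySem.Set.contains s.1 f then s else (PySem.Set.add s.1 f, s.2 ++ [f])

-- the `while stack:` loop of B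
def frfLoopB : Nat → PySem.Dict String (List String) → PySem.Set String → List String → PySem.Set String
  | 0, _, req, _ => req
  | n + 1, rev, req, st =>
    match PySem.List.pop? st (-1) with
    | none => req
    | some (cur, rest) =>
      let s := (rev.getD cur []).foldl frfPush (req, rest)
      frfLoopB n rev s.1 s.2

def find_required_files_alt (graph : List (String × List String)) (start_files : List String) : List String :=
  let items := (PySem.Dict.ofList graph).items
  frfLoopB (start_files.length + items.length) (frfBuildRev items) (PySem.Set.ofList start_files) start_files

-- ===== PRECONDITION & SPEC =====
def Spec_find_required_files (graph : List (String × List String)) (start_files : List String) (out : List String) : Prop := out = find_required_files_alt graph start_files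
instance (graph : List (String × List String)) (start_files : List String) (out : List String) : Decidable (Spec_find_required_files graph start_files out) := by unfold Spec_find_required_files; infer_instance

-- ===== CLAIM (what is proved, stated in full; the proofs are below) =====
def Claim_equal_find_required_files : Prop := ∀ (graph : List (String × List String)) (start_files : List String), Dom_find_required_files graph start_files → Spec_find_required_files graph start_files (find_required_files graph start_files)

-- ===== LEMMAS AND PROOFS =====

-- the dependents of `cur` listed by the graph items, one entry per matching import occurrence
def frfRevSpec (items : List (String × List String)) (cur : String) : List String :=
  items.flatMap (fun p => (p.2.filter (· == cur)).map (fun _ => p.1))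

theorem frfBuildRevInner_getD (imps : List String) (f cur : String)
    (d : PySem.Dict String (List String)) :
    (imps.foldl (fun d imp => d.modify imp [] (· ++ [f])) d).getD cur []
      = d.getD cur [] ++ (imps.filter (· == cur)).map (fun _ => f) := by
  induction imps generalizing d with
  | nil => simp
  | cons i rest ih =>
    simp only [List.foldl_cons, List.filter_cons]
    by_cases h : i = cur
    · subst h
      simp [ih, PySem.Dict.getD_modify_self]
    · rw [ih, PySem.Dict.getD_modify_of_ne _ _ _ (Ne.symm h)]
      simp [h]

theorem frfBuildRev_getD_gen (items : List (String × List String)) (cur : String)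
    (d : PySem.Dict String (List String)) :
    (items.foldl (fun d p => p.2.foldl (fun d imp => d.modify imp [] (· ++ [p.1])) d) d).getD cur []
      = d.getD cur [] ++ frfRevSpec items cur := by
  induction items generalizing d with
  | nil => simp [frfRevSpec]
  | cons p rest ih =>
    simp only [List.foldl_cons, frfRevSpec, List.flatMap_cons]
    rw [ih, frfBuildRevInner_getD]
    simp [frfRevSpec]

theorem frfBuildRev_getD (items : List (String × List String)) (cur : String) :
    (frfBuildRev items).getD cur [] = frfRevSpec items cur := by
  rw [frfBuildRev, frfBuildRev_getD_gen]
  simp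

theorem frfPush_idem (s : PySem.Set String × List String) (f : String) :
    frfPush (frfPush s f) f = frfPush s f := by
  by_cases h : f ∈ s.1
  · simp [frfPush, h]
  · simp [frfPush, h]

theorem foldl_frfPush_const (l : List String) (f : String)
    (hl : ∀ x ∈ l, x = f) (s : PySem.Set String × List String) :
    l.foldl frfPush s = if l.isEmpty then s else frfPush s f := by
  induction l generalizing s with
  | nil => simp
  | cons x rest ih =>
    have hx : x = f := hl x (by simp)
    subst hx
    simp only [List.foldl_cons, List.isEmpty_cons, if_neg Bool.false_ne_true]
    rw [ih (fun y hy => hl y (by simp [hy]))]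
    by_cases h : rest.isEmpty <;> simp [h, frfPush_idem]

theorem frfScanA_eq_foldl (items : List (String × List String)) (cur : String)
    (req : PySem.Set String) (tc : List String) :
    frfScanA items cur req tc = (frfRevSpec items cur).foldl frfPush (req, tc) := by
  induction items generalizing req tc with
  | nil => simp [frfScanA, frfRevSpec]
  | cons p rest ih =>
    obtain ⟨f, imps⟩ := p
    have hconst : ∀ x ∈ (imps.filter (· == cur)).map (fun _ => f), x = f := by
      intro x hx
      obtain ⟨a, _, h⟩ := List.mem_map.1 hx
      exact h.symm
    have hempty : ((imps.filter (· == cur)).map (fun _ => f)).isEmpty = !imps.contains cur := by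
      cases hc : imps.contains cur with
      | false =>
        have hc' : cur ∉ imps := by simpa using hc
        simp only [Bool.not_false, List.isEmpty_iff, List.map_eq_nil_iff, List.filter_eq_nil_iff]
        exact fun a ha h => hc' ((by simpa using h : a = cur) ▸ ha)
      | true =>
        have hc' : cur ∈ imps := by simpa using hc
        have hne : imps.filter (· == cur) ≠ [] := fun hnil => by
          have := List.filter_eq_nil_iff.1 hnil cur hc'
          simp at this
        simpa [List.isEmpty_iff, List.map_eq_nil_iff] using hne
    simp only [frfScanA, frfRevSpec, List.flatMap_cons, List.foldl_append]
    rw [foldl_frfPush_const ((imps.filter (· == cur)).map (fun _ => f)) f hconst (req, tc),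
        hempty]
    by_cases hc : imps.contains cur = true
    · by_cases hr : f ∈ req
      · have hr' : PySem.Set.contains req f = true := (PySem.Set.contains_iff req f).2 hr
        simp [frfPush, hr, ih, frfRevSpec]
      · have hr' : PySem.Set.contains req f = false := by
          simp [PySem.Set.contains_eq_listContains]; exact hr
        simp [frfPush, hr, ih, frfRevSpec]
        split <;> rfl
    · have hc' : cur ∉ imps := by simpa using hc
      simp [hc', ih, frfRevSpec]

theorem frfLoop_eq (n : Nat) (items : List (String × List String))
    (req : PySem.Set String) (tc : List String) :
    frfLoopA n items req tc = frfLoopB n (frfBuildRev items) req tc := by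
  induction n generalizing req tc with
  | zero => rfl
  | succ n ih =>
    simp only [frfLoopA, frfLoopB]
    cases h : PySem.List.pop? tc (-1) with
    | none => rfl
    | some r =>
      simp only [frfScanA_eq_foldl, frfBuildRev_getD, ih]

-- ===== VERDICT (by name: the statement is the Claim_ definition above) =====
theorem find_required_files_spec : Claim_equal_find_required_files := by
  intro graph start_files _
  show _ = _
  simp only [find_required_files, find_required_files_alt]
  exact frfLoop_eq _ _ _ _
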